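-- pv_equiv track=rewrite | github.com/Gendo90/topCoder | 400-600 pts/topcoderTwain.py | yearSix
-- ===== SOURCE A (Python) =====
-- def yearSix(words):
--     words = words.split(" ")
--     newWords = []
--     for word in words:
--         if(word[0:2]=="kn"):
--             this_word = word.replace("kn", "n", 1)
--         else:
--             this_word = word
--         newWords.append(this_word)
--     words = " ".join(newWords)
--     return words
-- ===== SOURCE B (Python) =====
-- def yearSix(words):
--     out = []
--     start = True
--     i = 0
--     n = len(words)
--     while i < n:
--         c = words[i]
--         if start and c == "k" and i + 1 < n and words[i + 1] == "n":
--             out.append("n")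
--             i += 2
--             start = False
--         elif c == " ":
--             out.append(" ")
--             i += 1
--             start = True
--         else:
--             out.append(c)
--             i += 1
--             start = False
--     return "".join(out)
-- ===== Notes on version B (the rewrite author's own statement) =====
-- stated objective: alternative
-- what changed: B replaces A's split-on-space / per-word replace / join pipeline with a single left-to-right character scan that carries a word-start flag and drops the 'k' of a leading "kn" in place.
import Mathlib
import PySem

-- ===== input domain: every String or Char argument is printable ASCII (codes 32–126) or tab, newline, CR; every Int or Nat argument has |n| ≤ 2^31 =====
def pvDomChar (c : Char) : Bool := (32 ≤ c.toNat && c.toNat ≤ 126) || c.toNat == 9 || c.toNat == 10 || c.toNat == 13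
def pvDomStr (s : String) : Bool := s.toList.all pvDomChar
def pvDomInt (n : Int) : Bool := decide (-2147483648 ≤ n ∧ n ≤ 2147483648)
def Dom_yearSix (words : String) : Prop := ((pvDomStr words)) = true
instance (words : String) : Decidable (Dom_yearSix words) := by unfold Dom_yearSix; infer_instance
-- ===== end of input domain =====

-- B replaces A's split-on-space / per-word fixup / join with a single left-to-right
-- character scan carrying a word-start flag (objective: alternative, same cost).

-- ===== PORT A =====
-- word.replace("kn", "n", 1): replace the FIRST occurrence of "kn"; hand port (PySem has
-- no count-limited replace), exact: scans left to right for the first "kn".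
def knReplaceFirst : List Char → List Char
  | 'k' :: 'n' :: rest => 'n' :: rest
  | c :: rest => c :: knReplaceFirst rest
  | [] => []

def yearSix (words : String) : String :=
  let ws := PySem.Chars.splitOn words.toList [' ']
  let newWords := ws.foldl (fun acc word =>
    acc ++ [if PySem.Chars.slice word (some 0) (some 2) == ['k', 'n']
            then knReplaceFirst word else word]) []
  String.ofList (PySem.Chars.join [' '] newWords)

-- ===== PORT B =====
-- one pass over the characters; `start` is Source B's word-start flag, the three branches
-- are Source B's three branches in the same order ("rest.take 1 = ['n']" is "i+1 < n and words[i+1] == 'n'")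
def scanKn (start : Bool) (cs : List Char) : List Char :=
  match cs with
  | [] => []
  | c :: rest =>
    if start = true ∧ c = 'k' ∧ rest.take 1 = ['n'] then
      'n' :: scanKn false (rest.drop 1)
    else if c = ' ' then ' ' :: scanKn true rest
    else c :: scanKn false rest
termination_by cs.length
decreasing_by all_goals (simp; try omega)

def yearSix_alt (words : String) : String :=
  String.ofList (scanKn true words.toList)

-- ===== PRECONDITION & SPEC =====
def Spec_yearSix (words : String) (out : String) : Prop := out = yearSix_alt words
instance (words : String) (out : String) : Decidable (Spec_yearSix words out) := by unfold Spec_yearSix; infer_instance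

-- ===== CLAIM (what is proved, stated in full; the proofs are below) =====
def Claim_equal_yearSix : Prop := ∀ (words : String), Dom_yearSix words → Spec_yearSix words (yearSix words)

-- ===== LEMMAS AND PROOFS =====

-- proof-side characterisation of split-on-' ': (first word, remaining words)
def mySplit : List Char → List Char × List (List Char)
  | [] => ([], [])
  | c :: rest =>
    if c = ' ' then ([], (mySplit rest).1 :: (mySplit rest).2)
    else (c :: (mySplit rest).1, (mySplit rest).2)

-- A's per-word transform, named for the proofs
def fWord (w : List Char) : List Char :=
  if PySem.Chars.slice w (some 0) (some 2) == ['k', 'n'] then knReplaceFirst w else w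

theorem splitOn_go_eq (fuel : Nat) (l cur : List Char) (acc : List (List Char))
    (h : l.length < fuel) :
    PySem.Chars.splitOn.go [' '] fuel l cur acc
      = acc.reverse ++ (cur.reverse ++ (mySplit l).1) :: (mySplit l).2 := by
  induction fuel generalizing l cur acc with
  | zero => omega
  | succ fuel ih =>
    cases l with
    | nil => simp [PySem.Chars.splitOn.go, mySplit]
    | cons c rest =>
      by_cases hc : c = ' '
      · subst hc
        rw [show PySem.Chars.splitOn.go [' '] (fuel+1) (' ' :: rest) cur acc
              = PySem.Chars.splitOn.go [' '] fuel (List.drop 1 (' ' :: rest)) [] (cur.reverse :: acc) by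
            simp [PySem.Chars.splitOn.go, List.isPrefixOf]]
        rw [ih _ _ _ (by simp at h ⊢; omega)]
        simp [mySplit]
      · rw [show PySem.Chars.splitOn.go [' '] (fuel+1) (c :: rest) cur acc
              = PySem.Chars.splitOn.go [' '] fuel rest (c :: cur) acc by
            simp [PySem.Chars.splitOn.go, List.isPrefixOf]
            exact fun h => absurd h.symm hc]
        rw [ih _ _ _ (by simp at h ⊢; omega)]
        simp [mySplit, hc]

theorem splitOn_eq (l : List Char) :
    PySem.Chars.splitOn l [' '] = (mySplit l).1 :: (mySplit l).2 := by
  show PySem.Chars.splitOn.go [' '] (l.length + 1) l [] [] = _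
  rw [splitOn_go_eq _ _ _ _ (by omega)]
  simp

theorem foldl_snoc_map (f : List Char → List Char) (l : List (List Char)) (acc : List (List Char)) :
    l.foldl (fun a w => a ++ [f w]) acc = acc ++ l.map f := by
  induction l generalizing acc with
  | nil => simp
  | cons w t ih => simp [ih]

theorem slice02_eq_take (w : List Char) :
    PySem.Chars.slice w (some 0) (some 2) = w.take 2 := by
  simp [PySem.List.slice]

theorem fWord_nil : fWord [] = [] := by decide

theorem fWord_kn (rest : List Char) : fWord ('k' :: 'n' :: rest) = 'n' :: rest := by
  simp [fWord, PySem.List.slice, knReplaceFirst]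

theorem fWord_eq_self (w : List Char) (h : ∀ r, w ≠ 'k' :: 'n' :: r) : fWord w = w := by
  unfold fWord
  rw [slice02_eq_take]
  match w with
  | [] => simp
  | [c] => simp
  | c :: d :: rest =>
    have hcd : ¬ (c = 'k' ∧ d = 'n') := by
      rintro ⟨rfl, rfl⟩; exact h rest rfl
    by_cases hc : c = 'k'
    · have hd : d ≠ 'n' := fun hd => hcd ⟨hc, hd⟩
      simp [hc, hd]
    · simp [hc]

-- if the first word of a split starts with a char d, the string starts with d
theorem mySplit_head_char (rest : List Char) (d : Char) (l : List Char)
    (h : (mySplit rest).1 = d :: l) : rest.take 1 = [d] := by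
  cases rest with
  | nil => simp [mySplit] at h
  | cons e t =>
    by_cases he : e = ' '
    · simp [mySplit, he] at h
    · simp [mySplit, he] at h
      simp [h.1]

theorem intercalate_cons (w : List Char) (ws : List (List Char)) :
    [' '].intercalate (w :: ws)
      = w ++ (if ws = [] then [] else ' ' :: [' '].intercalate ws) := by
  cases ws <;> simp [List.intercalate]

-- one-step evaluation of scanKn
theorem scanKn_eval (start : Bool) (c : Char) (rest : List Char) :
    scanKn start (c :: rest)
      = if start = true ∧ c = 'k' ∧ rest.take 1 = ['n'] then
          'n' :: scanKn false (rest.drop 1)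
        else if c = ' ' then ' ' :: scanKn true rest
        else c :: scanKn false rest := by
  rw [scanKn]

-- joint invariant: from a word start the scan computes A's value; mid-word it copies
-- the rest of the current word and applies fWord to every later word
theorem scan_inv (n : Nat) : ∀ (cs : List Char), cs.length ≤ n →
    scanKn true cs = [' '].intercalate (fWord (mySplit cs).1 :: ((mySplit cs).2).map fWord)
    ∧ scanKn false cs = [' '].intercalate ((mySplit cs).1 :: ((mySplit cs).2).map fWord) := by
  induction n with
  | zero =>
    intro cs h
    have : cs = [] := List.eq_nil_of_length_eq_zero (Nat.le_zero.mp h)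
    subst this
    constructor <;> simp [scanKn, mySplit, fWord_nil, List.intercalate]
  | succ n ih =>
    intro cs h
    cases cs with
    | nil => constructor <;> simp [scanKn, mySplit, fWord_nil, List.intercalate]
    | cons c rest =>
      have hlen : rest.length ≤ n := by simp at h; omega
      have hr := ih rest hlen
      by_cases hc : c = ' '
      · subst hc
        have hsplit : mySplit (' ' :: rest) = ([], (mySplit rest).1 :: (mySplit rest).2) := by
          simp [mySplit]
        have hstep : ∀ st, scanKn st (' ' :: rest) = ' ' :: scanKn true rest := by
          intro st; rw [scanKn_eval]; simp
        constructor <;>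
          · rw [hstep, hr.1, hsplit]
            simp [fWord_nil, List.intercalate]
      · have hsplit : mySplit (c :: rest) = (c :: (mySplit rest).1, (mySplit rest).2) := by
          simp [mySplit, hc]
        have hQ : scanKn false (c :: rest)
            = [' '].intercalate ((c :: (mySplit rest).1) :: ((mySplit rest).2).map fWord) := by
          rw [scanKn_eval,
              if_neg (show ¬(false = true ∧ c = 'k' ∧ rest.take 1 = ['n']) from
                fun hh => by simpa using hh.1),
              if_neg hc, hr.2, intercalate_cons, intercalate_cons]
          simp
        refine ⟨?_, by rw [hQ, hsplit]⟩
        rw [hsplit]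
        by_cases hkn : c = 'k' ∧ rest.take 1 = ['n']
        · obtain ⟨rfl, htake⟩ := hkn
          obtain ⟨rest2, rfl⟩ : ∃ t, rest = 'n' :: t := by
            cases rest with
            | nil => simp at htake
            | cons d t => simp at htake; exact ⟨t, by rw [htake]⟩
          have hr2 := ih rest2 (by simp at hlen; omega)
          have hsplit2 : mySplit ('n' :: rest2) = ('n' :: (mySplit rest2).1, (mySplit rest2).2) := by
            simp [mySplit]
          rw [scanKn_eval,
              if_pos (show true = true ∧ 'k' = 'k' ∧ ('n' :: rest2).take 1 = ['n'] from
                ⟨rfl, rfl, by simp⟩),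
              show ('n' :: rest2).drop 1 = rest2 from rfl, hr2.2, hsplit2, fWord_kn,
              intercalate_cons, intercalate_cons]
          simp
        · have hfw : fWord (c :: (mySplit rest).1) = c :: (mySplit rest).1 := by
            apply fWord_eq_self
            intro r hr'
            apply hkn
            have hc' : c = 'k' := by injection hr'
            refine ⟨hc', ?_⟩
            have : (mySplit rest).1 = 'n' :: r := by injection hr'
            exact mySplit_head_char rest 'n' r this
          rw [scanKn_eval,
              if_neg (show ¬(true = true ∧ c = 'k' ∧ rest.take 1 = ['n']) from
                fun hh => hkn ⟨hh.2.1, hh.2.2⟩),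
              if_neg hc, hr.2, hfw, intercalate_cons, intercalate_cons]
          simp

-- ===== VERDICT (by name: the statement is the Claim_ definition above) =====
theorem yearSix_spec : Claim_equal_yearSix := by
  intro words _
  unfold Spec_yearSix yearSix yearSix_alt
  simp only [splitOn_eq]
  rw [show (fun (acc : List (List Char)) (word : List Char) =>
        acc ++ [if PySem.Chars.slice word (some 0) (some 2) == ['k', 'n']
                then knReplaceFirst word else word])
      = (fun acc word => acc ++ [fWord word]) from rfl,
      foldl_snoc_map]
  have h := (scan_inv words.toList.length words.toList le_rfl).1
  simp only [PySem.Chars.join, List.nil_append, List.map_cons]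
  rw [h]
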